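-- pv_equiv track=rewrite | github.com/hwkxhh/refine-x | refine-x/backend/app/services/conditional_validation.py | find_columns_by_pattern
-- ===== SOURCE A (Python) =====
-- from typing import Any, Dict, List, Optional, Set, Tuple
--
-- def find_columns_by_pattern(columns: List[str], patterns: List[str]) -> List[str]:
--     """Find columns matching any of the patterns."""
--     matches = []
--     for col in columns:
--         col_lower = col.lower()
--         for pattern in patterns:
--             if pattern in col_lower:
--                 matches.append(col)
--                 break
--     return matches
-- ===== SOURCE B (Python) =====
-- def find_columns_by_pattern(columns, patterns):
--     """Find columns matching any pattern: patterns-outer passes over a shrinking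
--     worklist of still-unmatched column indices."""
--     lowers = [c.lower() for c in columns]
--     remaining = list(range(len(columns)))
--     hit = set()
--     for pattern in patterns:
--         still = []
--         for i in remaining:
--             if pattern in lowers[i]:
--                 hit.add(i)
--             else:
--                 still.append(i)
--         remaining = still
--     return [c for i, c in enumerate(columns) if i in hit]
-- ===== Notes on version B (the rewrite author's own statement) =====
-- stated objective: alternative
-- what changed: Replaces A's columns-outer loop with break by patterns-outer passes over a shrinking worklist of still-unmatched column indices (names lowercased once up front), collecting matched indices into a set and finally filtering the columns by index membership.
import Mathlib
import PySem

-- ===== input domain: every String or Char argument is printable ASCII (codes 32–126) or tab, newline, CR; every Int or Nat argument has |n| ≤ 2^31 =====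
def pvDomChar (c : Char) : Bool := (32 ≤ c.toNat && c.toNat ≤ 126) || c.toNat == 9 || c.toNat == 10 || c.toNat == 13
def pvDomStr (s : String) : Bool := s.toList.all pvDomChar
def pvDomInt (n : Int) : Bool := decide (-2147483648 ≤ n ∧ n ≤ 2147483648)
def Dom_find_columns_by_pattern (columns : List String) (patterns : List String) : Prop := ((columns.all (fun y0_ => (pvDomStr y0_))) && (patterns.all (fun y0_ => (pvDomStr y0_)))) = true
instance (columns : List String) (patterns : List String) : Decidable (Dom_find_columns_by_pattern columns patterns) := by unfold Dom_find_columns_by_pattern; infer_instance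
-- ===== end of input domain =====

-- B replaces A's columns-outer loop with break by patterns-outer passes over a shrinking
-- worklist of still-unmatched (index, lowered name) pairs; alternative structure.

-- ===== PORT A =====
-- inner 'for pattern in patterns: if pattern in col_lower: matches.append(col); break'
def pvInnerA (col_lower : String) (acc : List String) (col : String) : List String → List String
  | [] => acc
  | p :: ps => if PySem.Str.isIn p col_lower then acc ++ [col] else pvInnerA col_lower acc col ps

def find_columns_by_pattern (columns : List String) (patterns : List String) : List String :=
  columns.foldl (fun acc col => pvInnerA (PySem.Str.lower col) acc col patterns) []

-- ===== PORT B =====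
-- inner 'for i in remaining: if pattern in lowers[i]: hit.add(i) else: still.append(i)'
def pvStepB (lowers : List String) (pattern : String) (st : List Int × PySem.Set Int) (i : Int) :
    List Int × PySem.Set Int :=
  if PySem.Str.isIn pattern (PySem.List.pyGetD lowers i "") then (st.1, PySem.Set.add st.2 i)
  else (st.1 ++ [i], st.2)

def find_columns_by_pattern_alt (columns : List String) (patterns : List String) : List String :=
  let lowers := columns.map PySem.Str.lower
  let remaining0 := PySem.List.pyRange 0 (columns.length : Int) 1
  let final := patterns.foldl
    (fun (st : List Int × PySem.Set Int) pattern =>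
      st.1.foldl (pvStepB lowers pattern) ([], st.2))
    (remaining0, PySem.Set.empty)
  ((PySem.List.enumerate columns).filter (fun q => PySem.Set.contains final.2 q.1)).map (fun q => q.2)

-- ===== PRECONDITION & SPEC =====
def Spec_find_columns_by_pattern (columns : List String) (patterns : List String) (out : List String) : Prop := out = find_columns_by_pattern_alt columns patterns
instance (columns : List String) (patterns : List String) (out : List String) : Decidable (Spec_find_columns_by_pattern columns patterns out) := by unfold Spec_find_columns_by_pattern; infer_instance

-- ===== CLAIM (what is proved, stated in full; the proofs are below) =====
def Claim_equal_find_columns_by_pattern : Prop := ∀ (columns : List String) (patterns : List String), Dom_find_columns_by_pattern columns patterns → Spec_find_columns_by_pattern columns patterns (find_columns_by_pattern columns patterns)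

-- ===== LEMMAS AND PROOFS =====

-- the break loop appends col exactly when some pattern matches
theorem pvInnerA_eq (cl : String) (acc : List String) (col : String) (pats : List String) :
    pvInnerA cl acc col pats =
      if pats.any (fun p => PySem.Str.isIn p cl) then acc ++ [col] else acc := by
  induction pats with
  | nil => simp [pvInnerA]
  | cons p ps ih =>
    by_cases h : PySem.Chars.isIn p.toList cl.toList = true <;>
      simp [pvInnerA, h, ih]

-- A's fold is a filter
theorem fold_A_filter (patterns : List String) (columns acc : List String) :
    columns.foldl (fun acc col => pvInnerA (PySem.Str.lower col) acc col patterns) acc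
      = acc ++ columns.filter (fun col => patterns.any fun p => PySem.Str.isIn p (PySem.Str.lower col)) := by
  induction columns generalizing acc with
  | nil => simp
  | cons c t ih =>
    rw [List.foldl_cons, pvInnerA_eq, ih]
    by_cases h : (patterns.any fun p => PySem.Str.isIn p (PySem.Str.lower c)) = true
    · rw [if_pos h, List.filter_cons_of_pos (by simpa using h)]
      simp
    · rw [if_neg h, List.filter_cons_of_neg (by simpa using h)]

-- one pass of B's inner loop: filters the worklist, adds the matched indices
theorem pvStepB_fold (lowers : List String) (p : String) (rem still : List Int)
    (hit : PySem.Set Int) :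
    rem.foldl (pvStepB lowers p) (still, hit)
      = (still ++ rem.filter (fun i => !PySem.Str.isIn p (PySem.List.pyGetD lowers i "")),
         (rem.filter (fun i => PySem.Str.isIn p (PySem.List.pyGetD lowers i ""))).foldl
           (fun s i => PySem.Set.add s i) hit) := by
  induction rem generalizing still hit with
  | nil => simp
  | cons i t ih =>
    by_cases h : PySem.Chars.isIn p.toList (PySem.List.pyGetD lowers i "").toList = true <;>
      simp [pvStepB, h, ih]

theorem mem_foldl_set_add (l : List Int) (s : PySem.Set Int) (x : Int) :
    x ∈ l.foldl (fun s i => PySem.Set.add s i) s ↔ x ∈ s ∨ x ∈ l := by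
  induction l generalizing s with
  | nil => simp
  | cons a t ih => simp [ih, PySem.Set.mem_add, or_assoc]

-- membership in the hit set after B's outer loop
theorem outerB_mem (lowers : List String) (pats : List String) (rem : List Int)
    (hit : PySem.Set Int) (x : Int) :
    (x ∈ (pats.foldl
        (fun (st : List Int × PySem.Set Int) pattern =>
          st.1.foldl (pvStepB lowers pattern) ([], st.2)) (rem, hit)).2)
      ↔ (x ∈ hit ∨ (x ∈ rem ∧
          (pats.any fun p => PySem.Str.isIn p (PySem.List.pyGetD lowers x "")) = true)) := by
  induction pats generalizing rem hit with
  | nil => simp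
  | cons p ps ih =>
    rw [List.foldl_cons, pvStepB_fold, List.nil_append, ih, mem_foldl_set_add]
    simp only [List.mem_filter, List.any_cons, Bool.or_eq_true, Bool.not_eq_eq_eq_not,
      Bool.not_true]
    constructor
    · rintro ((hx | ⟨hxr, hm⟩) | ⟨⟨hxr, hnm⟩, hany⟩)
      · exact Or.inl hx
      · exact Or.inr ⟨hxr, Or.inl hm⟩
      · exact Or.inr ⟨hxr, Or.inr hany⟩
    · rintro (hx | ⟨hxr, hm | hany⟩)
      · exact Or.inl (Or.inl hx)
      · exact Or.inl (Or.inr ⟨hxr, hm⟩)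
      · by_cases h : PySem.Str.isIn p (PySem.List.pyGetD lowers x "") = true
        · exact Or.inl (Or.inr ⟨hxr, h⟩)
        · exact Or.inr ⟨⟨hxr, by simpa using h⟩, hany⟩

-- filtering an enumeration by a predicate on the value, then projecting, is a filter
theorem enum_filter_map (P : String → Bool) (l : List String) (s : Int) :
    ((PySem.List.enumerate l s).filter (fun q => P q.2)).map (fun q => q.2) = l.filter P := by
  induction l generalizing s with
  | nil => simp [PySem.List.enumerate_nil]
  | cons a t ih =>
    rw [PySem.List.enumerate_cons, List.filter_cons, List.filter_cons]
    by_cases h : P a = true <;> simp [h, ih]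

-- ===== VERDICT (by name: the statement is the Claim_ definition above) =====
theorem find_columns_by_pattern_spec : Claim_equal_find_columns_by_pattern := by
  intro columns patterns _
  show find_columns_by_pattern columns patterns = find_columns_by_pattern_alt columns patterns
  unfold find_columns_by_pattern
  rw [fold_A_filter, List.nil_append]
  simp only [find_columns_by_pattern_alt]
  rw [List.filter_congr (q := (fun q : Int × String =>
      patterns.any fun p => PySem.Str.isIn p (PySem.Str.lower q.2))) ?_]
  · exact (enum_filter_map (fun col => patterns.any fun p => PySem.Str.isIn p (PySem.Str.lower col)) columns 0).symm
  · intro q hq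
    rcases (PySem.List.mem_enumerate_iff _ _ _).mp hq with ⟨k, hk, rfl⟩
    rw [Bool.eq_iff_iff, PySem.Set.contains_iff, outerB_mem]
    simp only [PySem.Set.empty, List.not_mem_nil, false_or]
    constructor
    · rintro ⟨_, hany⟩
      have : PySem.List.pyGetD (columns.map PySem.Str.lower) ((0 : Int) + k) ""
          = PySem.Str.lower columns[k] := by
        rw [show ((0 : Int) + (k : Nat)) = ((k : Nat) : Int) by ring,
          PySem.List.pyGetD_natCast]
        simp [List.getD_eq_getElem?_getD, hk]
      simpa [this, List.getElem?_eq_getElem hk] using hany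
    · intro hany
      refine ⟨?_, ?_⟩
      · rw [PySem.List.mem_pyRange_iff_of_pos (by norm_num)]
        constructor <;> omega
      · have : PySem.List.pyGetD (columns.map PySem.Str.lower) ((0 : Int) + k) ""
            = PySem.Str.lower columns[k] := by
          rw [show ((0 : Int) + (k : Nat)) = ((k : Nat) : Int) by ring,
            PySem.List.pyGetD_natCast]
          simp [List.getD_eq_getElem?_getD, hk]
        simpa [this, List.getElem?_eq_getElem hk] using hany
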